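-- pv_equiv track=rewrite | github.com/sherry-debug715/Algorithms-notes | DFS/SudokuSolver/SudokuSolver.py | initial_build
-- ===== SOURCE A (Python) =====
-- def initial_build(board):
--     used = {
--         "col": [set() for _ in range(9)],
--         "row": [set() for _ in range(9)],
--         "box": [set() for _ in range(9)]
--     }
--
--     n = len(board)
--     for r in range(n):
--         for c in range(n):
--             if board[r][c] == 0:
--                 continue
--             box_idx = (r // 3 * 3) + (c // 3)
--             used["col"][c].add(board[r][c])
--             used["row"][r].add(board[r][c])
--             used["box"][box_idx].add(board[r][c])
--
--     return used
-- ===== SOURCE B (Python) =====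
-- def initial_build(board):
--     n = len(board)
--     cells = [(r, c, board[r][c])
--              for r in range(n) for c in range(n) if board[r][c] != 0]
--     return {
--         "col": [{v for _, c, v in cells if c == i} for i in range(9)],
--         "row": [{v for r, _, v in cells if r == i} for i in range(9)],
--         "box": [{v for r, c, v in cells if r // 3 * 3 + c // 3 == i} for i in range(9)],
--     }
-- ===== Notes on version B (the rewrite author's own statement) =====
-- stated objective: alternative
-- what changed: Replaces A's nested per-cell loop that incrementally mutates three 9-slot set arrays with a grouping decomposition: one flat pass materialises the nonzero cells, then each of the nine col/row/box buckets is built by a comprehension over that cell list; Pre_ excludes exactly the inputs on which A raises IndexError (a row shorter than the board, or a nonzero cell at row/column index >= 9).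
import Mathlib
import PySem

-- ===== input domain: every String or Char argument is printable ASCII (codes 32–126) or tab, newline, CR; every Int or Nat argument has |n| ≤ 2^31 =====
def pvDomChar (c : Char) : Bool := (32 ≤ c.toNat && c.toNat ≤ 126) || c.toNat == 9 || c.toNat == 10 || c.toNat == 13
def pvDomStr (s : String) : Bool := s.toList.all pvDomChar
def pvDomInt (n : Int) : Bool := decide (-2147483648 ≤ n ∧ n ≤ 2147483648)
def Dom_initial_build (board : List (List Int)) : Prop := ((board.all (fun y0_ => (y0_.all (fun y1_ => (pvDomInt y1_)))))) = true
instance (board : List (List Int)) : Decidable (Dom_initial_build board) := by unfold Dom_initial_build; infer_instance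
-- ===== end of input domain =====

-- B builds the three families by a grouping decomposition (materialise the nonzero cells once,
-- then one comprehension per bucket) instead of A's nested per-cell loop that incrementally
-- mutates three 9-slot set arrays.

-- ===== PORT A =====
-- board[r][c] is ported as (board.getD r []).getD c 0: exact under Pre_ (r < n and c < n ≤ row length);
-- used[...][idx].add(...) is ported as List.modify idx (PySem.Set.add · v): exact under Pre_ (idx < 9).
def initial_build (board : List (List Int)) : List (String × List (List Int)) :=
  let n := board.length
  let res := (List.range n).foldl (fun st r =>
    (List.range n).foldl (fun (st : List (List Int) × List (List Int) × List (List Int)) c =>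
      let v := (board.getD r []).getD c 0
      if v == 0 then st
      else
        let boxIdx := r / 3 * 3 + c / 3
        (st.1.modify c (fun s => PySem.Set.add s v),
         st.2.1.modify r (fun s => PySem.Set.add s v),
         st.2.2.modify boxIdx (fun s => PySem.Set.add s v))) st)
    (List.replicate 9 ([] : List Int), List.replicate 9 ([] : List Int), List.replicate 9 ([] : List Int))
  [("col", res.1), ("row", res.2.1), ("box", res.2.2)]

-- ===== PORT B =====
-- The cell-list comprehension: board[r][c] ported as (board.getD r []).getD c 0 (exact under Pre_:
-- c < n ≤ row length); each set comprehension becomes PySem.Set.ofList of the filtered cell list.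
def pvCellsB (board : List (List Int)) : List (Nat × Nat × Int) :=
  let n := board.length
  (List.range n).flatMap (fun r =>
    ((List.range n).filter (fun c => (board.getD r []).getD c 0 != 0)).map
      (fun c => (r, c, (board.getD r []).getD c 0)))

def initial_build_alt (board : List (List Int)) : List (String × List (List Int)) :=
  let cells := pvCellsB board
  [("col", (List.range 9).map (fun i =>
      PySem.Set.ofList ((cells.filter (fun t => t.2.1 == i)).map (fun t => t.2.2)))),
   ("row", (List.range 9).map (fun i =>
      PySem.Set.ofList ((cells.filter (fun t => t.1 == i)).map (fun t => t.2.2)))),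
   ("box", (List.range 9).map (fun i =>
      PySem.Set.ofList ((cells.filter (fun t => t.1 / 3 * 3 + t.2.1 / 3 == i)).map (fun t => t.2.2))))]

-- ===== PRECONDITION & SPEC =====
-- Pre_ excludes exactly the inputs on which the Python A raises IndexError: a row shorter than the
-- board (board[r][c] fails), or a nonzero cell at a row/column index ≥ 9 (used[...][idx] fails).
def Pre_initial_build (board : List (List Int)) : Prop :=
  (∀ row ∈ board, board.length ≤ row.length) ∧
  (∀ r < board.length, ∀ c < board.length, (board.getD r []).getD c 0 ≠ 0 → r < 9 ∧ c < 9)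
instance (board : List (List Int)) : Decidable (Pre_initial_build board) := by
  unfold Pre_initial_build; infer_instance

def pvWitness_initial_build : List (List Int) :=
  [[5, 3, 0, 0, 7, 0, 0, 0, 0],
   [6, 0, 0, 1, 9, 5, 0, 0, 0],
   [0, 9, 8, 0, 0, 0, 0, 6, 0],
   [8, 0, 0, 0, 6, 0, 0, 0, 3],
   [4, 0, 0, 8, 0, 3, 0, 0, 1],
   [7, 0, 0, 0, 2, 0, 0, 0, 6],
   [0, 6, 0, 0, 0, 0, 2, 8, 0],
   [0, 0, 0, 4, 1, 9, 0, 0, 5],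
   [0, 0, 0, 0, 8, 0, 0, 7, 9]]

def Spec_initial_build (board : List (List Int)) (out : List (String × List (List Int))) : Prop := out = initial_build_alt board
instance (board : List (List Int)) (out : List (String × List (List Int))) : Decidable (Spec_initial_build board out) := by unfold Spec_initial_build; infer_instance

-- ===== CLAIM (what is proved, stated in full; the proofs are below) =====
def Claim_equal_initial_build : Prop := ∀ (board : List (List Int)), Dom_initial_build board → Pre_initial_build board → Spec_initial_build board (initial_build board)

-- ===== LEMMAS AND PROOFS =====

/-- board[r][c] as the ports read it. -/
def pvVal (board : List (List Int)) (a : Nat × Nat) : Int := (board.getD a.1 []).getD a.2 0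

/-- The cells A visits, in A's row-major order. -/
def pvCells (n : Nat) : List (Nat × Nat) :=
  (List.range n).flatMap (fun r => (List.range n).map (fun c => (r, c)))

/-- One cell's effect on one family: skip zeros, else add into bucket k. -/
def pvTouch (board : List (List Int)) (a : Nat × Nat) (k : Nat) (s : List (List Int)) : List (List Int) :=
  if pvVal board a == 0 then s else s.modify k (fun t => PySem.Set.add t (pvVal board a))

/-- One of A's three per-family folds, isolated. -/
def pvBucket (board : List (List Int)) (key : Nat × Nat → Nat) (items : List (Nat × Nat))
    (acc : List (List Int)) : List (List Int) :=
  items.foldl (fun ls a => pvTouch board a (key a) ls) acc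

lemma pvBucket_length (board key items acc) :
    (pvBucket board key items acc).length = acc.length := by
  induction items generalizing acc with
  | nil => rfl
  | cons a t ih =>
      show (pvBucket board key t (pvTouch board a (key a) acc)).length = acc.length
      rw [ih]
      unfold pvTouch
      split <;> simp [List.length_modify]

lemma pvBucket_getD (board key items) (acc : List (List Int)) (i : Nat) (hi : i < acc.length) :
    (pvBucket board key items acc).getD i []
      = ((items.filter (fun a => pvVal board a != 0 && key a == i)).map (pvVal board)).foldl
          PySem.Set.add (acc.getD i []) := by
  induction items generalizing acc with
  | nil => rfl
  | cons a t ih =>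
      have hstep : pvBucket board key (a :: t) acc
          = pvBucket board key t (pvTouch board a (key a) acc) := rfl
      rw [hstep, List.filter_cons]
      unfold pvTouch
      by_cases hv : pvVal board a = 0
      · rw [if_pos (by simpa using hv), ih acc hi]
        simp [hv]
      · rw [if_neg (by simpa using hv),
          ih _ (by simpa [List.length_modify] using hi)]
        by_cases hk : key a = i
        · subst hk
          simp [hv, List.getD_eq_getElem?_getD, List.getElem?_eq_getElem hi]
        · simp [hk, hv, List.getD_eq_getElem?_getD]

lemma pvFoldl_triple {ι : Type} (items : List ι)
    (f1 f2 f3 : ι → List (List Int) → List (List Int)) (x y z : List (List Int)) :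
    items.foldl (fun st a => (f1 a st.1, f2 a st.2.1, f3 a st.2.2)) (x, y, z)
      = (items.foldl (fun s a => f1 a s) x, items.foldl (fun s a => f2 a s) y,
         items.foldl (fun s a => f3 a s) z) := by
  induction items generalizing x y z with
  | nil => rfl
  | cons a t ih => simp [List.foldl_cons, ih]

/-- A's result, re-expressed as three independent bucket folds over the cell list. -/
lemma initial_build_eq_buckets (board : List (List Int)) :
    initial_build board
      = [("col", pvBucket board (fun a => a.2) (pvCells board.length) (List.replicate 9 [])),
         ("row", pvBucket board (fun a => a.1) (pvCells board.length) (List.replicate 9 [])),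
         ("box", pvBucket board (fun a => a.1 / 3 * 3 + a.2 / 3) (pvCells board.length)
            (List.replicate 9 []))] := by
  have hstep : ∀ r : Nat,
      (fun (st : List (List Int) × List (List Int) × List (List Int)) (c : Nat) =>
        if (board.getD r []).getD c 0 == 0 then st
        else
          (st.1.modify c (fun s => PySem.Set.add s ((board.getD r []).getD c 0)),
           st.2.1.modify r (fun s => PySem.Set.add s ((board.getD r []).getD c 0)),
           st.2.2.modify (r / 3 * 3 + c / 3)
             (fun s => PySem.Set.add s ((board.getD r []).getD c 0))))
      = (fun st c => (pvTouch board (r, c) c st.1, pvTouch board (r, c) r st.2.1,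
          pvTouch board (r, c) (r / 3 * 3 + c / 3) st.2.2)) := by
    intro r
    funext st c
    dsimp only [pvTouch, pvVal]
    split <;> rfl
  have h2 : (pvCells board.length).foldl
      (fun (st : List (List Int) × List (List Int) × List (List Int)) (a : Nat × Nat) =>
        (pvTouch board a a.2 st.1, pvTouch board a a.1 st.2.1,
         pvTouch board a (a.1 / 3 * 3 + a.2 / 3) st.2.2))
      (List.replicate 9 [], List.replicate 9 [], List.replicate 9 [])
      = (List.range board.length).foldl (fun st r =>
          (List.range board.length).foldl (fun st c =>
            (pvTouch board (r, c) c st.1, pvTouch board (r, c) r st.2.1,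
             pvTouch board (r, c) (r / 3 * 3 + c / 3) st.2.2)) st)
          (List.replicate 9 [], List.replicate 9 [], List.replicate 9 []) := by
    rw [pvCells, List.foldl_flatMap]
    simp only [List.foldl_map]
  have h1 : (pvCells board.length).foldl
      (fun (st : List (List Int) × List (List Int) × List (List Int)) (a : Nat × Nat) =>
        (pvTouch board a a.2 st.1, pvTouch board a a.1 st.2.1,
         pvTouch board a (a.1 / 3 * 3 + a.2 / 3) st.2.2))
      (List.replicate 9 [], List.replicate 9 [], List.replicate 9 [])
      = (pvBucket board (fun a => a.2) (pvCells board.length) (List.replicate 9 []),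
         pvBucket board (fun a => a.1) (pvCells board.length) (List.replicate 9 []),
         pvBucket board (fun a => a.1 / 3 * 3 + a.2 / 3) (pvCells board.length)
           (List.replicate 9 [])) := by
    rw [pvFoldl_triple]
    rfl
  unfold initial_build
  dsimp only
  simp only [hstep]
  rw [← h2, h1]

/-- Each of A's bucket folds, as the range-9 map of per-bucket filtered cell lists. -/
lemma pvBucket_eq_map (board : List (List Int)) (key : Nat × Nat → Nat) :
    pvBucket board key (pvCells board.length) (List.replicate 9 [])
      = (List.range 9).map (fun i =>
          PySem.Set.ofList
            (((pvCells board.length).filter (fun a => pvVal board a != 0 && key a == i)).map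
              (pvVal board))) := by
  apply List.ext_getElem
  · rw [pvBucket_length]
    simp
  · intro i h1 h2
    rw [pvBucket_length] at h1
    simp only [List.length_replicate] at h1
    rw [← List.getD_eq_getElem _ [] (by rw [pvBucket_length]; simpa),
      pvBucket_getD board key _ _ i (by simpa), List.getElem_map, List.getElem_range,
      List.getD_eq_getElem _ [] (by simpa), List.getElem_replicate,
      PySem.Set.ofList_eq_foldl]

/-- B's grouping of the cell list agrees with A's per-bucket filter of the cell grid. -/
lemma pvGroup (board : List (List Int)) (keyA : Nat × Nat → Nat) (keyT : Nat × Nat × Int → Nat)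
    (h : ∀ r c : Nat, keyT (r, c, pvVal board (r, c)) = keyA (r, c)) (i : Nat) :
    ((pvCellsB board).filter (fun t => keyT t == i)).map (fun t => t.2.2)
      = ((pvCells board.length).filter (fun a => pvVal board a != 0 && keyA a == i)).map
          (pvVal board) := by
  have hB : pvCellsB board
      = ((pvCells board.length).filter (fun a => pvVal board a != 0)).map
          (fun a => (a.1, a.2, pvVal board a)) := by
    simp only [pvCellsB, pvCells, List.filter_flatMap, List.map_flatMap, List.filter_map,
      List.map_map]
    rfl
  rw [hB, List.filter_map, List.map_map, List.filter_filter]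
  have hp : ∀ a ∈ pvCells board.length,
      (((fun t => keyT t == i) ∘ fun a => (a.1, a.2, pvVal board a)) a && (pvVal board a != 0))
        = (pvVal board a != 0 && keyA a == i) := by
    intro a _
    cases a with
    | mk r c => simp [Function.comp, h r c, Bool.and_comm]
  rw [List.filter_congr hp]
  exact List.map_congr_left (fun a _ => rfl)

-- ===== VERDICT (by name: the statement is the Claim_ definition above) =====
theorem initial_build_spec : Claim_equal_initial_build := by
  intro board _hdom _hpre
  unfold Spec_initial_build initial_build_alt
  rw [initial_build_eq_buckets]
  dsimp only
  rw [pvBucket_eq_map board (fun a => a.2), pvBucket_eq_map board (fun a => a.1),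
    pvBucket_eq_map board (fun a => a.1 / 3 * 3 + a.2 / 3)]
  have hfam : ∀ (keyA : Nat × Nat → Nat) (keyT : Nat × Nat × Int → Nat),
      (∀ r c : Nat, keyT (r, c, pvVal board (r, c)) = keyA (r, c)) →
      (List.range 9).map (fun i =>
          PySem.Set.ofList
            (((pvCells board.length).filter (fun a => pvVal board a != 0 && keyA a == i)).map
              (pvVal board)))
        = (List.range 9).map (fun i =>
            PySem.Set.ofList (((pvCellsB board).filter (fun t => keyT t == i)).map
              (fun t => t.2.2))) := by
    intro keyA keyT h
    exact (List.map_congr_left (fun i _ =>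
      congrArg PySem.Set.ofList (pvGroup board keyA keyT h i))).symm
  rw [hfam (fun a => a.2) (fun t => t.2.1) (fun r c => rfl),
    hfam (fun a => a.1) (fun t => t.1) (fun r c => rfl),
    hfam (fun a => a.1 / 3 * 3 + a.2 / 3) (fun t => t.1 / 3 * 3 + t.2.1 / 3) (fun r c => rfl)]
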